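-- pv_equiv track=rewrite | github.com/manudoesstuff9-ops/rag_app | simpleRAGapp.py | simple_retrieve
-- ===== SOURCE A (Python) =====
-- from typing import Dict, List
--
-- def simple_retrieve(query: str, chunks: List[str], k: int = 3) -> List[Dict[str, str]]:
--     query_terms = set(query.lower().split())
--     scored = []
--
--     for chunk in chunks:
--         terms = set(chunk.lower().split())
--         score = len(query_terms.intersection(terms))
--         scored.append((score, chunk))
--
--     scored.sort(key=lambda item: item[0], reverse=True)
--     return [
--         {"text": chunk, "score": str(score)}
--         for score, chunk in scored[:k]
--         if score > 0
--     ]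
-- ===== SOURCE B (Python) =====
-- from typing import Dict, List
--
--
-- def simple_retrieve(query: str, chunks: List[str], k: int = 3) -> List[Dict[str, str]]:
--     # Inverted index: term -> list of indices of chunks whose term-set contains it.
--     index = {}
--     for i, chunk in enumerate(chunks):
--         for term in dict.fromkeys(chunk.lower().split()):
--             index[term] = index.get(term, []) + [i]
--
--     scores = [0] * len(chunks)
--     for term in dict.fromkeys(query.lower().split()):
--         for i in index.get(term, []):
--             scores[i] += 1
--
--     pairs = list(zip(scores, chunks))
--     pairs.sort(key=lambda p: p[0], reverse=True)
--     return [
--         {"text": chunk, "score": str(score)}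
--         for score, chunk in pairs[:k]
--         if score > 0
--     ]
-- ===== Notes on version B (the rewrite author's own statement) =====
-- stated objective: alternative
-- what changed: Replaced A's per-chunk set-intersection scoring with a single-pass inverted index (term -> list of chunk indices) plus an additively updated score table; the stable descending sort, [:k] slice and score>0 filter are kept.
import Mathlib
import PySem

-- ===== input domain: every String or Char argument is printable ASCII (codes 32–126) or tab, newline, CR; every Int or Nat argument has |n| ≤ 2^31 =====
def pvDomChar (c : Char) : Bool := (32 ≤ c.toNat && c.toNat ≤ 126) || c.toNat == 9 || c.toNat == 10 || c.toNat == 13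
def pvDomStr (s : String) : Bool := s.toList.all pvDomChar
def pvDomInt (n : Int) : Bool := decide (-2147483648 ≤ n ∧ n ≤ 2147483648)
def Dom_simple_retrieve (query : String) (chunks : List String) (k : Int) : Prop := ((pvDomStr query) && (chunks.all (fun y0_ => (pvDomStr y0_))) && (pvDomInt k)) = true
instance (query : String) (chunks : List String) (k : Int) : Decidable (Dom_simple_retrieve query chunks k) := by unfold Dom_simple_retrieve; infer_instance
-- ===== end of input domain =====

-- B replaces A's per-chunk set-intersection scoring by an inverted index (term -> chunk indices)
-- feeding an additively updated score table; same stable sort / slice / filter. Objective: alternative (not timed faster).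

-- ===== PORT A =====
def simple_retrieve (query : String) (chunks : List String) (k : Int) : List (List (String × String)) :=
  let query_terms : PySem.Set String := PySem.Set.ofList (PySem.Str.split₀ (PySem.Str.lower query))
  let scored : List (Int × String) :=
    chunks.foldl (fun acc chunk =>
      let terms : PySem.Set String := PySem.Set.ofList (PySem.Str.split₀ (PySem.Str.lower chunk))
      let score : Int := PySem.Set.len (PySem.Set.inter query_terms terms)
      acc ++ [(score, chunk)]) []
  let sortedScored := PySem.List.sorted scored (fun item => item.1) true
  ((PySem.List.slice sortedScored none (some k)).filter (fun p => decide (0 < p.1))).map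
    (fun p => [("text", p.2), ("score", PySem.Int.toStr p.1)])

-- ===== PORT B =====
def simple_retrieve_alt (query : String) (chunks : List String) (k : Int) : List (List (String × String)) :=
  let index : PySem.Dict String (List Int) :=
    (PySem.List.enumerate chunks 0).foldl (fun d ic =>
      (PySem.List.dedup (PySem.Str.split₀ (PySem.Str.lower ic.2))).foldl
        (fun d t => d.modify t [] (fun l => l ++ [ic.1])) d) PySem.Dict.empty
  let scores : List Int :=
    (PySem.List.dedup (PySem.Str.split₀ (PySem.Str.lower query))).foldl
      (fun sc t => (index.getD t []).foldl
        (fun sc i => PySem.List.pySetD sc i (PySem.List.pyGetD sc i 0 + 1)) sc)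
      (List.replicate chunks.length 0)
  let pairs := scores.zip chunks
  let sortedPairs := PySem.List.sorted pairs (fun p => p.1) true
  ((PySem.List.slice sortedPairs none (some k)).filter (fun p => decide (0 < p.1))).map
    (fun p => [("text", p.2), ("score", PySem.Int.toStr p.1)])

-- ===== PRECONDITION & SPEC =====
def Spec_simple_retrieve (query : String) (chunks : List String) (k : Int) (out : List (List (String × String))) : Prop := out = simple_retrieve_alt query chunks k
instance (query : String) (chunks : List String) (k : Int) (out : List (List (String × String))) : Decidable (Spec_simple_retrieve query chunks k out) := by unfold Spec_simple_retrieve; infer_instance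

-- ===== CLAIM (what is proved, stated in full; the proofs are below) =====
def Claim_equal_simple_retrieve : Prop := ∀ (query : String) (chunks : List String) (k : Int), Dom_simple_retrieve query chunks k → Spec_simple_retrieve query chunks k (simple_retrieve query chunks k)

-- ===== LEMMAS AND PROOFS =====

/-- The (deduplicated, lowercased) term list of a string. -/
def pvTerms (c : String) : List String := PySem.Set.ofList (PySem.Str.split₀ (PySem.Str.lower c))

/-- The list of indices B's inverted index stores for term `t`. -/
def pvIdxList (chunks : List String) (t : String) : List Int :=
  ((PySem.List.enumerate chunks 0).filter (fun ic => (pvTerms ic.2).contains t)).map (·.1)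

/-- A's score of one chunk. -/
def pvScore (query c : String) : Int :=
  PySem.Set.len (PySem.Set.inter (pvTerms query) (pvTerms c))

theorem pv_score_eq_filter (query c : String) :
    pvScore query c = (((pvTerms query).filter (fun t => (pvTerms c).contains t)).length : Int) := rfl

theorem pv_inner_fold (ts : List String) (hts : ts.Nodup) (d : PySem.Dict String (List Int))
    (i : Int) (t : String) :
    ((ts.foldl (fun d u => d.modify u [] (fun l => l ++ [i])) d).getD t [])
      = d.getD t [] ++ (if t ∈ ts then [i] else []) := by
  induction ts generalizing d with
  | nil => simp
  | cons u rest ih =>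
    obtain ⟨hu, hrest⟩ := List.nodup_cons.mp hts
    simp only [List.foldl_cons]
    rw [ih hrest, PySem.Dict.getD_modify]
    by_cases h : t = u
    · subst h
      simp [hu]
    · simp [h]

theorem pv_index_getD (cs : List String) (s : Int) (d : PySem.Dict String (List Int)) (t : String) :
    (((PySem.List.enumerate cs s).foldl (fun d ic =>
        ((PySem.List.dedup (PySem.Str.split₀ (PySem.Str.lower ic.2))).foldl
          (fun d u => d.modify u [] (fun l => l ++ [ic.1])) d)) d).getD t [])
      = d.getD t [] ++ ((PySem.List.enumerate cs s).filter (fun ic => (pvTerms ic.2).contains t)).map (·.1) := by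
  induction cs generalizing s d with
  | nil => simp [PySem.List.enumerate_nil]
  | cons c rest ih =>
    rw [PySem.List.enumerate_cons]
    simp only [List.foldl_cons, List.filter_cons]
    rw [ih, pv_inner_fold _ (by simp [PySem.List.dedup_eq_ofList, PySem.Set.nodup_ofList])]
    by_cases hmem : t ∈ pvTerms c
    · have hc : (pvTerms c).contains t = true := (PySem.Set.contains_iff _ _).mpr hmem
      simp only [pvTerms, PySem.List.dedup_eq_ofList] at hmem hc ⊢
      simp [hmem]
    · have hc : ¬ ((pvTerms c).contains t = true) := fun h => hmem ((PySem.Set.contains_iff _ _).mp h)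
      simp only [pvTerms, PySem.List.dedup_eq_ofList] at hmem hc ⊢
      simp [hmem]

theorem pv_idx_bounds (chunks : List String) (t : String) :
    ∀ j ∈ pvIdxList chunks t, 0 ≤ j ∧ j < (chunks.length : Int) := by
  intro j hj
  unfold pvIdxList at hj
  simp only [List.mem_map, List.mem_filter] at hj
  obtain ⟨ic, ⟨hic, _⟩, rfl⟩ := hj
  rw [PySem.List.mem_enumerate_iff] at hic
  obtain ⟨kk, hk, h⟩ := hic
  subst h
  simp only [zero_add]
  omega

theorem pv_idx_count (chunks : List String) (t : String) (m : Nat) (hm : m < chunks.length) :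
    (pvIdxList chunks t).count (m : Int)
      = if (pvTerms (chunks[m])).contains t then 1 else 0 := by
  have hnd : (pvIdxList chunks t).Nodup := by
    have hpw : (pvIdxList chunks t).Pairwise (· < ·) :=
      ((PySem.List.pairwise_lt_enumerate chunks 0).filter _).map _ (fun _ _ h => h)
    exact hpw.imp (fun h => ne_of_lt h)
  have hmemiff : ((m : Int) ∈ pvIdxList chunks t) ↔ (pvTerms (chunks[m])).contains t = true := by
    unfold pvIdxList
    simp only [List.mem_map, List.mem_filter, PySem.List.mem_enumerate_iff]
    constructor
    · rintro ⟨ic, ⟨⟨kk, hk, rfl⟩, hc⟩, hfst⟩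
      simp only [zero_add] at hc hfst
      have hkm : kk = m := by omega
      subst hkm
      exact hc
    · intro hc
      exact ⟨((m : Int), chunks[m]), ⟨⟨m, hm, by simp⟩, hc⟩, rfl⟩
  by_cases hc : (pvTerms (chunks[m])).contains t = true
  · have hmem : (m : Int) ∈ pvIdxList chunks t := hmemiff.mpr hc
    have h1 : 0 < (pvIdxList chunks t).count (m : Int) := List.count_pos_iff.mpr hmem
    have h2 : (pvIdxList chunks t).count (m : Int) ≤ 1 := List.nodup_iff_count_le_one.mp hnd _
    rw [if_pos hc]
    omega
  · have hnm : (m : Int) ∉ pvIdxList chunks t := fun hmem => hc (hmemiff.mp hmem)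
    rw [if_neg hc, List.count_eq_zero.mpr hnm]

theorem pv_getD_set (sc : List Int) (i m : Nat) (v : Int) (hi : i < sc.length) :
    (sc.set i v).getD m 0 = if i = m then v else sc.getD m 0 := by
  rw [List.getD_eq_getElem?_getD, List.getElem?_set, List.getD_eq_getElem?_getD]
  by_cases h : i = m
  · subst h
    simp [hi]
  · simp [h]

theorem pv_score_fold (idx : List Int) (sc : List Int)
    (hb : ∀ j ∈ idx, 0 ≤ j ∧ j < (sc.length : Int)) (m : Nat) :
    (idx.foldl (fun sc i => PySem.List.pySetD sc i (PySem.List.pyGetD sc i 0 + 1)) sc).getD m 0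
      = sc.getD m 0 + (idx.count (m : Int) : Int) := by
  induction idx generalizing sc with
  | nil => simp
  | cons j rest ih =>
    obtain ⟨hj0, hjlt⟩ := hb j (List.mem_cons_self)
    have hjl : j.toNat < sc.length := by omega
    simp only [List.foldl_cons]
    rw [PySem.List.pySetD_of_nonneg _ _ hj0]
    rw [ih _ (by intro j' hj'; have := hb j' (List.mem_cons_of_mem _ hj'); simpa using this)]
    have hget : PySem.List.pyGetD sc j 0 = sc.getD j.toNat 0 := by
      rw [PySem.List.pyGetD_eq_getElem sc 0 hj0 hjlt, List.getD_eq_getElem sc 0 hjl]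
    rw [hget, List.count_cons, pv_getD_set sc j.toNat m _ hjl]
    by_cases hmj : (m : Int) = j
    · have hmn : j.toNat = m := by omega
      have hone : (if (j == (m : Int)) = true then (1 : Nat) else 0) = 1 := by
        have h : j = (m : Int) := hmj.symm
        simp [h]
      rw [if_pos hmn, hone, hmn]
      push_cast
      ring
    · have hmn : ¬ (j.toNat = m) := by omega
      have hzero : (if (j == (m : Int)) = true then (1 : Nat) else 0) = 0 := by
        have h : ¬ j = (m : Int) := fun h => hmj h.symm
        simp [h]
      rw [if_neg hmn, hzero]
      push_cast
      ring

theorem pv_len1 (idx : List Int) (sc : List Int) :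
    (idx.foldl (fun sc i => PySem.List.pySetD sc i (PySem.List.pyGetD sc i 0 + 1)) sc).length
      = sc.length := by
  induction idx generalizing sc with
  | nil => rfl
  | cons j rest ih => simp [List.foldl_cons, ih, PySem.List.length_pySetD]

theorem pv_len2 (qs : List String) (chunks : List String) (sc : List Int) :
    (qs.foldl (fun sc t => ((pvIdxList chunks t).foldl
        (fun sc i => PySem.List.pySetD sc i (PySem.List.pyGetD sc i 0 + 1)) sc)) sc).length
      = sc.length := by
  induction qs generalizing sc with
  | nil => rfl
  | cons t qrest ih => simp [List.foldl_cons, ih, pv_len1]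

theorem pv_qfold (qs : List String) (chunks : List String) (sc : List Int)
    (hlen : sc.length = chunks.length) (m : Nat) (hm : m < chunks.length) :
    ((qs.foldl (fun sc t => ((pvIdxList chunks t).foldl
        (fun sc i => PySem.List.pySetD sc i (PySem.List.pyGetD sc i 0 + 1)) sc)) sc).getD m 0)
      = sc.getD m 0 + ((qs.filter (fun t => (pvTerms (chunks[m])).contains t)).length : Int) := by
  induction qs generalizing sc with
  | nil => simp
  | cons t qrest ih =>
    simp only [List.foldl_cons, List.filter_cons]
    rw [ih _ ((pv_len1 _ _).trans hlen)]
    rw [pv_score_fold _ _ (by intro j hj; have := pv_idx_bounds chunks t j hj; omega) m]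
    rw [pv_idx_count chunks t m hm]
    by_cases hc : (pvTerms (chunks[m])).contains t = true
    · rw [if_pos hc, if_pos hc, List.length_cons]
      push_cast
      ring
    · rw [if_neg hc, if_neg hc]
      push_cast
      ring

set_option maxHeartbeats 1000000 in
theorem pv_scores_eq (query : String) (chunks : List String) :
    ((PySem.List.dedup (PySem.Str.split₀ (PySem.Str.lower query))).foldl
      (fun sc t => ((pvIdxList chunks t).foldl
        (fun sc i => PySem.List.pySetD sc i (PySem.List.pyGetD sc i 0 + 1)) sc))
      (List.replicate chunks.length 0))
    = chunks.map (fun c => pvScore query c) := by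
  have hlenr : (List.replicate chunks.length (0 : Int)).length = chunks.length := by simp
  apply List.ext_getElem
  · rw [pv_len2]
    simp
  · intro m h1 h2
    have hm : m < chunks.length := by simpa using h2
    have hq := pv_qfold (PySem.List.dedup (PySem.Str.split₀ (PySem.Str.lower query))) chunks
      (List.replicate chunks.length 0) hlenr m hm
    rw [← List.getD_eq_getElem _ 0 h1, hq]
    have hrep : (List.replicate chunks.length (0 : Int)).getD m 0 = 0 := by
      rw [List.getD_eq_getElem?_getD, List.getElem?_replicate, if_pos hm]
      rfl
    rw [hrep, List.getElem_map, pv_score_eq_filter, zero_add]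
    simp only [pvTerms, PySem.List.dedup_eq_ofList]

theorem pv_zip {α β : Type} (l : List α) (f : α → β) :
    (l.map f).zip l = l.map (fun c => (f c, c)) := by
  induction l with
  | nil => rfl
  | cons a l ih => simp [ih]

-- ===== VERDICT (by name: the statement is the Claim_ definition above) =====
theorem simple_retrieve_spec : Claim_equal_simple_retrieve := by
  intro query chunks k _
  unfold Spec_simple_retrieve
  have hA := PySem.List.foldl_append_singleton_eq_map
    (fun chunk => (PySem.Set.len (PySem.Set.inter
      (PySem.Set.ofList (PySem.Str.split₀ (PySem.Str.lower query)))
      (PySem.Set.ofList (PySem.Str.split₀ (PySem.Str.lower chunk)))), chunk)) chunks []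
  rw [List.nil_append] at hA
  have hA' : chunks.foldl (fun acc chunk =>
      acc ++ [(PySem.Set.len (PySem.Set.inter
        (PySem.Set.ofList (PySem.Str.split₀ (PySem.Str.lower query)))
        (PySem.Set.ofList (PySem.Str.split₀ (PySem.Str.lower chunk)))), chunk)]) []
      = chunks.map (fun c => (pvScore query c, c)) := hA
  have hidx : ∀ t, ((PySem.List.enumerate chunks 0).foldl (fun d ic =>
      ((PySem.List.dedup (PySem.Str.split₀ (PySem.Str.lower ic.2))).foldl
        (fun d t => d.modify t [] (fun l => l ++ [ic.1])) d)) PySem.Dict.empty).getD t []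
      = pvIdxList chunks t := by
    intro t
    rw [pv_index_getD]
    simp [pvIdxList, PySem.Dict.getD_empty]
  show simple_retrieve query chunks k = simple_retrieve_alt query chunks k
  simp only [simple_retrieve, simple_retrieve_alt]
  simp only [hidx]
  rw [hA', pv_scores_eq, pv_zip]
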